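-- pv_equiv track=rewrite | github.com/gretelai/gretel-python-client | src/gretel_client/data_designer/data_designer.py | _add_backticks_to_column_names
-- ===== SOURCE A (Python) =====
-- def _add_backticks_to_column_names(step_name: str, column_names: list[str]) -> str:
--     """Add backticks to the column names in the step name if they are present.
--
--     This function is used in the context of logging workflow steps.
--
--     Args:
--         step_name: Name of the step.
--         column_names: List of possible column names.
--
--     Returns:
--         Step name with backticks added to the column names if present.
--     """
--     max_overlap = 0
--     best_match = None
--     for name in column_names:
--         if name in step_name:
--             overlap = len(name)
--             if overlap > max_overlap:
--                 max_overlap = overlap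
--                 best_match = name
--     if best_match:
--         step_name = step_name.replace(best_match, f"`{best_match}`")
--     return step_name
-- ===== SOURCE B (Python) =====
-- def _add_backticks_to_column_names(step_name: str, column_names: list[str]) -> str:
--     # Sort the non-empty candidate names longest-first (stable, so equal-length
--     # ties keep original list order) and take the first one contained in the
--     # step name: that is exactly the longest/first-wins match.
--     for name in sorted((n for n in column_names if n), key=len, reverse=True):
--         if name in step_name:
--             return step_name.replace(name, f"`{name}`")
--     return step_name
-- ===== Notes on version B (the rewrite author's own statement) =====
-- stated objective: alternative
-- what changed: Replaces the manual best-match accumulator loop (tracking max_overlap/best_match) with a stable longest-first sort of the non-empty candidates followed by taking the first candidate that is a substring of the step name.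
import Mathlib
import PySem

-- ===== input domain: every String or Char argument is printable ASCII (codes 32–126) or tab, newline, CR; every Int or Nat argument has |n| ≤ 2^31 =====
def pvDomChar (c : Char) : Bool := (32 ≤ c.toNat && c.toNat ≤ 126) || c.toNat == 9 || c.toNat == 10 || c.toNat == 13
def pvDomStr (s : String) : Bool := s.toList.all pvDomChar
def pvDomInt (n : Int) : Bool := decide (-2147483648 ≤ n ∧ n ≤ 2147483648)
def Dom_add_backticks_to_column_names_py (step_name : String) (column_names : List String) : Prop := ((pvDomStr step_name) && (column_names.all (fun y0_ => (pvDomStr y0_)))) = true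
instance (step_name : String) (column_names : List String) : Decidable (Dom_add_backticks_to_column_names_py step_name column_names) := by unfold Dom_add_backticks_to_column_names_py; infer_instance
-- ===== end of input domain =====

-- B replaces A's manual best-match accumulator loop by a stable longest-first sort
-- of the non-empty candidates followed by taking the first substring match (alternative decomposition).


-- ===== PORT A =====
-- loop body of A: updates (max_overlap, best_match) for one candidate name
def abtStep (step_name : String) (acc : Int × Option String) (name : String) : Int × Option String :=
  if PySem.Str.isIn name step_name then
    let overlap : Int := PySem.Str.len name
    if overlap > acc.1 then (overlap, some name) else acc
  else acc

def add_backticks_to_column_names_py (step_name : String) (column_names : List String) : String :=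
  match (column_names.foldl (abtStep step_name) (0, none)).2 with
  | some best_match =>
      -- `if best_match:` — truthy means: not None and not the empty string
      if best_match == "" then step_name
      else PySem.Str.replace step_name best_match ("`" ++ best_match ++ "`")
  | none => step_name

-- ===== PORT B =====
def add_backticks_to_column_names_py_alt (step_name : String) (column_names : List String) : String :=
  match (PySem.List.sorted (column_names.filter (fun n => n != "")) (fun n => PySem.Str.len n) true).find?
      (fun n => PySem.Str.isIn n step_name) with
  | some name => PySem.Str.replace step_name name ("`" ++ name ++ "`")
  | none => step_name

-- ===== PRECONDITION & SPEC =====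
def Spec_add_backticks_to_column_names_py (step_name : String) (column_names : List String) (out : String) : Prop := out = add_backticks_to_column_names_py_alt step_name column_names
instance (step_name : String) (column_names : List String) (out : String) : Decidable (Spec_add_backticks_to_column_names_py step_name column_names out) := by unfold Spec_add_backticks_to_column_names_py; infer_instance

-- ===== CLAIM (what is proved, stated in full; the proofs are below) =====
def Claim_equal_add_backticks_to_column_names_py : Prop := ∀ (step_name : String) (column_names : List String), Dom_add_backticks_to_column_names_py step_name column_names → Spec_add_backticks_to_column_names_py step_name column_names (add_backticks_to_column_names_py step_name column_names)

-- ===== LEMMAS AND PROOFS =====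

-- the empty string is a substring of everything ("" in s is True)
theorem isIn_empty (s : String) : PySem.Str.isIn "" s = true := by
  rw [PySem.Str.isIn_iff_infix]
  simpa using (List.nil_infix : [] <:+: s.toList)

-- a non-empty string has positive Python length
theorem len_pos_of_ne_empty (s : String) (h : s ≠ "") : 0 < PySem.Str.len s := by
  have : s.toList ≠ [] := fun hnil => h (String.toList_eq_nil_iff.mp hnil)
  simp only [PySem.Str.len_eq]
  have := List.length_pos_iff.mpr this
  exact_mod_cast this

-- empty-string candidates never change A's loop state (overlap 0 is never > max_overlap ≥ 0)
theorem foldl_abtStep_filter (step_name : String) (xs : List String)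
    (st : Int × Option String) (hst : 0 ≤ st.1) :
    xs.foldl (abtStep step_name) st = (xs.filter (fun n => n != "")).foldl (abtStep step_name) st := by
  induction xs generalizing st with
  | nil => rfl
  | cons x xs ih =>
    by_cases hx : x = ""
    · subst hx
      have hstep : abtStep step_name st "" = st := by
        simp only [abtStep, isIn_empty, if_true]
        have hlen : PySem.Str.len "" = 0 := by decide
        simp only [hlen]
        have : ¬ ((0 : Int) > st.1) := by omega
        simp [this]
      simp only [List.foldl_cons, List.filter_cons]
      simp only [show (("" : String) != "") = false from rfl, hstep]
      exact ih st hst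
    · have hnext : 0 ≤ (abtStep step_name st x).1 := by
        simp only [abtStep]
        split
        · split
          · have := len_pos_of_ne_empty x hx; simpa using le_of_lt this
          · exact hst
        · exact hst
      simp only [List.foldl_cons, List.filter_cons]
      have : (x != "") = true := by simpa using hx
      simp only [this, if_true, List.foldl_cons]
      exact ih _ hnext

-- find? after one stable descending insertion, on a descending-sorted list
theorem find?_insertBy (P : String → Bool) (key : String → Int) (x : String) (l : List String)
    (hl : l.Pairwise (fun a b => key b ≤ key a)) :
    (PySem.List.insertBy (fun a b => decide (key b < key a)) x l).find? P =
      if P x then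
        match l.find? P with
        | none => some x
        | some m => if key m < key x then some x else some m
      else l.find? P := by
  induction l with
  | nil =>
    by_cases hP : P x = true
    · simp [PySem.List.insertBy, List.find?, hP]
    · simp [PySem.List.insertBy, List.find?, hP]
  | cons y ys ih =>
    have hhead : ∀ z ∈ ys, key z ≤ key y := (List.pairwise_cons.mp hl).1
    have htail : ys.Pairwise (fun a b => key b ≤ key a) := (List.pairwise_cons.mp hl).2
    by_cases hlt : key y < key x
    · -- inserted at the front
      have : PySem.List.insertBy (fun a b => decide (key b < key a)) x (y :: ys) = x :: y :: ys := by
        simp [PySem.List.insertBy, hlt]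
      rw [this]
      by_cases hP : P x = true
      · rw [List.find?_cons_of_pos hP]
        simp only [hP, if_true]
        cases hfind : (y :: ys).find? P with
        | none => rfl
        | some m =>
          have hm : m ∈ y :: ys := List.mem_of_find?_eq_some hfind
          have : key m ≤ key y := by
            rcases List.mem_cons.mp hm with h | h
            · exact le_of_eq (congrArg key h)
            · exact hhead m h
          have hmx : key m < key x := lt_of_le_of_lt this hlt
          simp [hmx]
      · rw [List.find?_cons_of_neg hP]
        simp [hP]
    · -- x goes after y
      have : PySem.List.insertBy (fun a b => decide (key b < key a)) x (y :: ys) =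
          y :: PySem.List.insertBy (fun a b => decide (key b < key a)) x ys := by
        simp [PySem.List.insertBy, hlt]
      rw [this]
      by_cases hPy : P y = true
      · -- y is found first in both
        have hle : ¬ key y < key x := hlt
        rw [List.find?_cons_of_pos hPy, List.find?_cons_of_pos hPy]
        by_cases hP : P x = true <;> simp [hP, hle]
      · rw [List.find?_cons_of_neg hPy, List.find?_cons_of_neg hPy]
        exact ih htail

-- closed form of one step of A's loop
theorem abtStep_eq (step_name : String) (st : Int × Option String) (name : String) :
    abtStep step_name st name =
      if PySem.Str.isIn name step_name = true ∧ st.1 < PySem.Str.len name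
      then (PySem.Str.len name, some name) else st := by
  by_cases h1 : PySem.Str.isIn name step_name = true
  · by_cases h2 : st.1 < PySem.Str.len name
    · rw [if_pos ⟨h1, h2⟩]
      simp only [abtStep, h1, if_true, gt_iff_lt, h2]
    · rw [if_neg (fun hc => h2 hc.2)]
      simp only [abtStep, h1, if_true, gt_iff_lt, h2, if_false]
  · rw [if_neg (fun hc => h1 hc.1)]
    have h1' : PySem.Str.isIn name step_name = false := by simpa using h1
    simp only [abtStep, h1', Bool.false_eq_true, if_false]

-- state of A\'s loop over ys (all non-empty) versus B's first match in the stable descending sort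
theorem loop_vs_sorted (step_name : String) (ys : List String) (hne : ∀ n ∈ ys, n ≠ "") :
    (ys.foldl (abtStep step_name) (0, none)).2 =
        (PySem.List.sorted ys (fun n => PySem.Str.len n) true).find?
          (fun n => PySem.Str.isIn n step_name) ∧
    (∀ m, (ys.foldl (abtStep step_name) (0, none)).2 = some m →
        (ys.foldl (abtStep step_name) (0, none)).1 = PySem.Str.len m) ∧
    ((ys.foldl (abtStep step_name) (0, none)).2 = none →
        (ys.foldl (abtStep step_name) (0, none)).1 = 0) := by
  induction ys using List.reverseRecOn with
  | nil =>
    refine ⟨rfl, ?_, fun _ => rfl⟩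
    intro m hm
    simp at hm
  | append_singleton ys x ih =>
    have hne' : ∀ n ∈ ys, n ≠ "" := fun n hn => hne n (by simp [hn])
    have hx : x ≠ "" := hne x (by simp)
    obtain ⟨ihfind, ihsome, ihnone⟩ := ih hne'
    have hpair := PySem.List.sorted_pairwise_rev ys (fun n => PySem.Str.len n)
    have hsorted : PySem.List.sorted (ys ++ [x]) (fun n => PySem.Str.len n) true =
        PySem.List.insertBy (fun a b => decide (PySem.Str.len b < PySem.Str.len a)) x
          (PySem.List.sorted ys (fun n => PySem.Str.len n) true) := by
      rw [PySem.List.sorted_rev_eq_foldl_insertBy, PySem.List.sorted_rev_eq_foldl_insertBy,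
        List.foldl_append, List.foldl_cons, List.foldl_nil]
    rw [List.foldl_append, List.foldl_cons, List.foldl_nil, hsorted,
      find?_insertBy _ _ _ _ hpair, ← ihfind]
    set st := ys.foldl (abtStep step_name) (0, (none : Option String)) with hst
    by_cases hP : PySem.Str.isIn x step_name = true
    · simp only [hP, if_true]
      cases h2 : st.2 with
      | none =>
        have h1 : st.1 = 0 := ihnone h2
        have hlen : 0 < PySem.Str.len x := len_pos_of_ne_empty x hx
        rw [abtStep_eq, if_pos ⟨hP, lt_of_le_of_lt (le_of_eq h1) hlen⟩]
        exact ⟨rfl, fun m hm => by injection hm with h; rw [h], fun hm => nomatch hm⟩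
      | some m =>
        have h1 : st.1 = PySem.Str.len m := ihsome m h2
        by_cases hcmp : PySem.Str.len m < PySem.Str.len x
        · rw [abtStep_eq, if_pos ⟨hP, lt_of_le_of_lt (le_of_eq h1) hcmp⟩]
          refine ⟨?_, fun m' hm' => by injection hm' with h; rw [h], fun hm' => nomatch hm'⟩
          show some x = if PySem.Str.len m < PySem.Str.len x then some x else some m
          rw [if_pos hcmp]
        · rw [abtStep_eq, if_neg (fun hc => hcmp (lt_of_le_of_lt (le_of_eq h1.symm) hc.2))]
          refine ⟨?_, fun m' hm' => ?_, fun hm' => ?_⟩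
          · show st.2 = if PySem.Str.len m < PySem.Str.len x then some x else some m
            rw [if_neg hcmp]; exact h2
          · rw [h2] at hm'; injection hm' with h; exact h1.trans (congrArg PySem.Str.len h)
          · rw [h2] at hm'; simp at hm'
    · rw [abtStep_eq, if_neg (fun hc => hP hc.1), if_neg hP]
      exact ⟨rfl, ihsome, ihnone⟩

-- ===== VERDICT (by name: the statement is the Claim_ definition above) =====
theorem add_backticks_to_column_names_py_spec : Claim_equal_add_backticks_to_column_names_py := by
  intro step_name column_names _
  unfold Spec_add_backticks_to_column_names_py
  unfold add_backticks_to_column_names_py add_backticks_to_column_names_py_alt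
  rw [foldl_abtStep_filter step_name column_names (0, none) (by norm_num)]
  set ys := column_names.filter (fun n => n != "") with hys
  have hne : ∀ n ∈ ys, n ≠ "" := by
    intro n hn
    have := (List.mem_filter.mp hn).2
    simpa using this
  obtain ⟨hfind, _, _⟩ := loop_vs_sorted step_name ys hne
  rw [hfind]
  cases h : (PySem.List.sorted ys (fun n => PySem.Str.len n) true).find?
      (fun n => PySem.Str.isIn n step_name) with
  | none => rfl
  | some m =>
    have hm : m ∈ ys := by
      have := List.mem_of_find?_eq_some h
      rwa [PySem.List.mem_sorted] at this
    have hmne : (m == "") = false := by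
      have := hne m hm
      simpa using this
    simp [hmne]
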